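-- pv_equiv track=rewrite | github.com/hcarissa/Tucil3_13520164 | src/functions.py | cekPosisiKosong
-- ===== SOURCE A (Python) =====
-- def cekPosisiKosong(matrix):
--     finalPos = 0
--     shadedArea = [1, 3, 4, 6, 9, 11, 12, 14]
--     for i in range(4):
--         for j in range(4):
--             if (matrix[i][j] == 16 and ((4*i+j) in shadedArea)):
--                 finalPos = 1
--     return finalPos
-- ===== SOURCE B (Python) =====
-- def cekPosisiKosong(matrix):
--     shadedArea = [1, 3, 4, 6, 9, 11, 12, 14]
--     return int(any(matrix[p // 4][p % 4] == 16 for p in shadedArea))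
-- ===== Notes on version B (the rewrite author's own statement) =====
-- stated objective: simpler
-- what changed: Instead of scanning all 16 cells of the 4x4 board and testing each flat index against the shadedArea list, B iterates directly over the 8 shaded positions, decodes each to (p//4, p%4) and checks that cell for 16 with any().
import Mathlib
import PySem

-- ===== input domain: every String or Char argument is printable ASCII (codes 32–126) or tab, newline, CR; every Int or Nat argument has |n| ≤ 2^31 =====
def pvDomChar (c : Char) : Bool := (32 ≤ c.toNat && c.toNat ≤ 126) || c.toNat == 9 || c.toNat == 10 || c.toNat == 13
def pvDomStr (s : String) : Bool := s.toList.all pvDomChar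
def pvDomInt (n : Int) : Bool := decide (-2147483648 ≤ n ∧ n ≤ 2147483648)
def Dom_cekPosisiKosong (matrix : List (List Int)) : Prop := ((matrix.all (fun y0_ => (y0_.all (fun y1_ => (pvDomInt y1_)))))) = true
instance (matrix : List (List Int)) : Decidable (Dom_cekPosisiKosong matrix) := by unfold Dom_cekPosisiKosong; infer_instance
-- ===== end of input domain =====

-- B iterates directly over the 8 shaded positions (decoding p into row p//4, col p%4) instead of scanning all 16 cells with a membership test; objective: simpler.


-- ===== PORT A =====
def cekPosisiKosong (matrix : List (List Int)) : Int :=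
  (PySem.List.pyRange 0 4 1).foldl (fun finalPos i =>
    (PySem.List.pyRange 0 4 1).foldl (fun finalPos j =>
      if PySem.List.pyGet? ((PySem.List.pyGet? matrix i).getD []) j == some 16
          && ([1, 3, 4, 6, 9, 11, 12, 14] : List Int).contains (4 * i + j) then
        (1 : Int)
      else finalPos) finalPos) 0

-- ===== PORT B =====
def cekPosisiKosong_alt (matrix : List (List Int)) : Int :=
  if ([1, 3, 4, 6, 9, 11, 12, 14] : List Int).any (fun p =>
      PySem.List.pyGet? ((PySem.List.pyGet? matrix (PySem.Int.floordiv p 4)).getD [])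
        (PySem.Int.mod p 4) == some 16)
  then 1 else 0

-- ===== PRECONDITION & SPEC =====
-- Pre_ excludes exactly the inputs on which Python A raises IndexError: boards with
-- fewer than 4 rows or with a row shorter than 4 among the first four.
def Pre_cekPosisiKosong (matrix : List (List Int)) : Prop :=
  4 ≤ matrix.length ∧ ∀ row ∈ matrix.take 4, 4 ≤ row.length
instance (matrix : List (List Int)) : Decidable (Pre_cekPosisiKosong matrix) := by
  unfold Pre_cekPosisiKosong; infer_instance
def pvWitness_cekPosisiKosong : List (List Int) :=
  [[1, 16, 2, 3], [4, 5, 6, 7], [8, 9, 10, 11], [12, 13, 14, 15]]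
def Spec_cekPosisiKosong (matrix : List (List Int)) (out : Int) : Prop := out = cekPosisiKosong_alt matrix
instance (matrix : List (List Int)) (out : Int) : Decidable (Spec_cekPosisiKosong matrix out) := by unfold Spec_cekPosisiKosong; infer_instance

-- ===== CLAIM (what is proved, stated in full; the proofs are below) =====
def Claim_equal_cekPosisiKosong : Prop := ∀ (matrix : List (List Int)), Dom_cekPosisiKosong matrix → Pre_cekPosisiKosong matrix → Spec_cekPosisiKosong matrix (cekPosisiKosong matrix)

-- ===== LEMMAS AND PROOFS =====
theorem len4_destruct {α : Type} (l : List α) (h : 4 ≤ l.length) :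
    ∃ a b c d t, l = a :: b :: c :: d :: t := by
  match l, h with
  | a :: b :: c :: d :: t, _ => exact ⟨a, b, c, d, t, rfl⟩

theorem pg2 {α : Type} (x0 x1 x2 x3 : α) (t : List α) :
    PySem.List.pyGet? (x0 :: x1 :: x2 :: x3 :: t) 2 = some x2 := by
  simp only [PySem.List.pyGet?, PySem.List.pyIdx?, List.length_cons]
  split
  · split
    · simp
    · exfalso; omega
  · exfalso; omega
theorem pg3 {α : Type} (x0 x1 x2 x3 : α) (t : List α) :
    PySem.List.pyGet? (x0 :: x1 :: x2 :: x3 :: t) 3 = some x3 := by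
  simp only [PySem.List.pyGet?, PySem.List.pyIdx?, List.length_cons]
  split
  · split
    · simp
    · exfalso; omega
  · exfalso; omega

theorem foldl_if_any (p : Int → Bool) (l : List Int) (init : Int) :
    l.foldl (fun acc x => if p x then 1 else acc) init
      = if l.any p then 1 else init := by
  induction l generalizing init with
  | nil => simp
  | cons x xs ih =>
      simp only [List.foldl_cons, List.any_cons, ih]
      by_cases hx : p x = true <;> by_cases hxs : xs.any p = true <;> simp [hx, hxs]

-- ===== VERDICT (by name: the statement is the Claim_ definition above) =====
theorem cekPosisiKosong_spec : Claim_equal_cekPosisiKosong := by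
  intro matrix _ hpre
  obtain ⟨hlen, hrows⟩ := hpre
  obtain ⟨r0, r1, r2, r3, t, rfl⟩ := len4_destruct matrix hlen
  obtain ⟨a0, a1, a2, a3, t0, rfl⟩ := len4_destruct r0 (hrows r0 (by simp))
  obtain ⟨b0, b1, b2, b3, t1, rfl⟩ := len4_destruct r1 (hrows r1 (by simp))
  obtain ⟨c0, c1, c2, c3, t2, rfl⟩ := len4_destruct r2 (hrows r2 (by simp))
  obtain ⟨d0, d1, d2, d3, t3, rfl⟩ := len4_destruct r3 (hrows r3 (by simp))
  show cekPosisiKosong _ = cekPosisiKosong_alt _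
  have hr : PySem.List.pyRange 0 4 1 = [0, 1, 2, 3] := by decide
  rw [cekPosisiKosong, cekPosisiKosong_alt, hr]
  simp only [foldl_if_any]
  simp only [List.any_cons, List.any_nil,
    show PySem.Int.floordiv 1 4 = 0 from by decide,
    show PySem.Int.floordiv 3 4 = 0 from by decide,
    show PySem.Int.floordiv 4 4 = 1 from by decide,
    show PySem.Int.floordiv 6 4 = 1 from by decide,
    show PySem.Int.floordiv 9 4 = 2 from by decide,
    show PySem.Int.floordiv 11 4 = 2 from by decide,
    show PySem.Int.floordiv 12 4 = 3 from by decide,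
    show PySem.Int.floordiv 14 4 = 3 from by decide,
    show PySem.Int.mod 1 4 = 1 from by decide,
    show PySem.Int.mod 3 4 = 3 from by decide,
    show PySem.Int.mod 4 4 = 0 from by decide,
    show PySem.Int.mod 6 4 = 2 from by decide,
    show PySem.Int.mod 9 4 = 1 from by decide,
    show PySem.Int.mod 11 4 = 3 from by decide,
    show PySem.Int.mod 12 4 = 0 from by decide,
    show PySem.Int.mod 14 4 = 2 from by decide]
  simp [pg2, pg3, or_assoc]
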